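-- pv_equiv track=rewrite | github.com/kuklinistvan/pykuklin | src/pykuklin/conan/tools.py | merge_flag_dictionaries
-- ===== SOURCE A (Python) =====
-- from typing import Dict
-- from copy import deepcopy
--
-- def merge_flag_dictionaries(a: Dict[str, str], b: Dict[str, str]) -> Dict[str, str]:
--     """
--         >>> a = {'CFLAGS': '-1'}
--         >>> b = {'CFLAGS': ' -2'}
--         >>> merge_flag_dictionaries(a, b)
--         {'CFLAGS': '-1 -2'}
--     """
--
--     a_copy = deepcopy(a)
--     b_copy = deepcopy(b)
--
--     merged_entries = {}
--
--     for i in a_copy.items():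
--         for j in b_copy.items():
--             if i[0] == j[0]:
--                 matching_entry_name = i[0]
--                 content_first = i[1]
--                 content_second = j[1]
--
--                 merged_entries[matching_entry_name] = ' '.join([content_first, content_second])
--
--     for i in merged_entries.items():
--         del a_copy[i[0]]
--         del b_copy[i[0]]
--
--     a_left = a_copy
--     b_left = b_copy
--
--     return {**a_left, **b_left, **merged_entries}
-- ===== SOURCE B (Python) =====
-- def merge_flag_dictionaries(a, b):
--     out = {k: v for k, v in a.items() if k not in b}
--     out.update((k, v) for k, v in b.items() if k not in a)
--     out.update((k, ' '.join([v, b[k]])) for k, v in a.items() if k in b)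
--     return out
-- ===== Notes on version B (the rewrite author's own statement) =====
-- stated objective: simpler
-- what changed: A's three phases (a nested intersection loop building merged entries, a deletion loop stripping them from copies of both inputs, and a three-way dict unpack) are replaced by three independent single-pass comprehensions over a.items()/b.items() that directly emit a-only entries, b-only entries, and joined shared entries in the same order; no deepcopy and no deletion.
import Mathlib
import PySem

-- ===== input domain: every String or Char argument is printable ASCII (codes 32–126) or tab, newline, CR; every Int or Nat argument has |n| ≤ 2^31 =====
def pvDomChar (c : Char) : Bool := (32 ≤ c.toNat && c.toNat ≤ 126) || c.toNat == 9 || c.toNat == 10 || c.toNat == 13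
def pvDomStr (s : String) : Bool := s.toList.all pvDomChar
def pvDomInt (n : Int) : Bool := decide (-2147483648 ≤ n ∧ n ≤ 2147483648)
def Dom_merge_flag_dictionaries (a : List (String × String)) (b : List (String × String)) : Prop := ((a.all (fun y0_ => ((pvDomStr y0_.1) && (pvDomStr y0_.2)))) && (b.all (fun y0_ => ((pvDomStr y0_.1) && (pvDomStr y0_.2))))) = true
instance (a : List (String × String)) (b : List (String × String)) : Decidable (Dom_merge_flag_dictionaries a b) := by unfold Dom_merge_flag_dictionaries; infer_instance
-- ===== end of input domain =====

-- B replaces A's nested intersection loop + deletion loop + three-way unpack by three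
-- independent single passes (simpler decomposition); return value only, neither mutates its inputs.

-- ===== PORT A =====
def merge_flag_dictionaries (a : List (String × String)) (b : List (String × String)) : List (String × String) :=
  let a_copy := PySem.Dict.ofList a
  let b_copy := PySem.Dict.ofList b
  let merged_entries : PySem.Dict String String :=
    a_copy.items.foldl (fun m i =>
      b_copy.items.foldl (fun m j =>
        if i.1 == j.1 then m.insert i.1 (PySem.Str.join " " [i.2, j.2]) else m) m)
      PySem.Dict.empty
  let a_left := merged_entries.items.foldl (fun d i => d.erase i.1) a_copy
  let b_left := merged_entries.items.foldl (fun d i => d.erase i.1) b_copy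
  (((PySem.Dict.empty.update a_left.items).update b_left.items).update merged_entries.items).items

-- ===== PORT B =====
def merge_flag_dictionaries_alt (a : List (String × String)) (b : List (String × String)) : List (String × String) :=
  let da := PySem.Dict.ofList a
  let db := PySem.Dict.ofList b
  -- out = {k: v for k, v in a.items() if k not in b}
  let out := da.items.foldl (fun m p => if db.contains p.1 then m else m.insert p.1 p.2) PySem.Dict.empty
  -- out.update((k, v) for k, v in b.items() if k not in a)
  let out := db.items.foldl (fun m p => if da.contains p.1 then m else m.insert p.1 p.2) out
  -- out.update((k, ' '.join([v, b[k]])) for k, v in a.items() if k in b)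
  let out := da.items.foldl (fun m p =>
    if db.contains p.1 then m.insert p.1 (PySem.Str.join " " [p.2, db.getD p.1 ""]) else m) out
  out.items

-- ===== PRECONDITION & SPEC =====
def Spec_merge_flag_dictionaries (a : List (String × String)) (b : List (String × String)) (out : List (String × String)) : Prop := out = merge_flag_dictionaries_alt a b
instance (a : List (String × String)) (b : List (String × String)) (out : List (String × String)) : Decidable (Spec_merge_flag_dictionaries a b out) := by unfold Spec_merge_flag_dictionaries; infer_instance

-- ===== CLAIM (what is proved, stated in full; the proofs are below) =====
def Claim_equal_merge_flag_dictionaries : Prop := ∀ (a : List (String × String)) (b : List (String × String)), Dom_merge_flag_dictionaries a b → Spec_merge_flag_dictionaries a b (merge_flag_dictionaries a b)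

-- ===== LEMMAS AND PROOFS =====

-- a fold that conditionally inserts fresh distinct keys appends the filtered, mapped entries
theorem items_foldl_insert_if (P : String × String → Bool) (g : String × String → String) :
    ∀ (xs : List (String × String)) (d : PySem.Dict String String),
      (xs.map Prod.fst).Nodup → (∀ p ∈ xs, P p = true → d.contains p.1 = false) →
      (xs.foldl (fun m p => if P p then m.insert p.1 (g p) else m) d).items
        = d.items ++ (xs.filter P).map (fun p => (p.1, g p)) := by
  intro xs
  induction xs with
  | nil => intro d _ _; simp
  | cons x xs ih =>
    intro d hnd h2
    simp only [List.map_cons, List.nodup_cons] at hnd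
    by_cases hP : P x = true
    · have hfresh : d.contains x.1 = false := h2 x (by simp) hP
      have hstep : (d.insert x.1 (g x)).items = d.items ++ [(x.1, g x)] :=
        PySem.Dict.items_insert_of_not_contains _ _ hfresh
      have h2' : ∀ p ∈ xs, P p = true → (d.insert x.1 (g x)).contains p.1 = false := by
        intro p hp hPp
        have hne : p.1 ≠ x.1 := by
          intro he; exact hnd.1 (he ▸ List.mem_map_of_mem hp)
        rw [PySem.Dict.contains_insert]
        simp [hne, h2 p (List.mem_cons_of_mem _ hp) hPp]
      simp only [List.foldl_cons, if_pos hP]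
      rw [ih _ hnd.2 h2', hstep, List.filter_cons_of_pos hP]
      simp
    · simp only [List.foldl_cons, if_neg hP]
      rw [ih _ hnd.2 (fun p hp hPp => h2 p (List.mem_cons_of_mem _ hp) hPp),
        List.filter_cons_of_neg (by simpa using hP)]

-- inner loop of A over a keyset with no matching key leaves the accumulator unchanged
theorem inner_no_match (k w : String) :
    ∀ (ys : List (String × String)) (m : PySem.Dict String String),
      (∀ j ∈ ys, k ≠ j.1) →
      ys.foldl (fun m j => if k == j.1 then m.insert k (PySem.Str.join " " [w, j.2]) else m) m = m := by
  intro ys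
  induction ys with
  | nil => intro m _; simp
  | cons y ys ih =>
    intro m h
    have : (k == y.1) = false := by simpa using h y (by simp)
    simp only [List.foldl_cons, this, Bool.false_eq_true, if_false]
    exact ih m (fun j hj => h j (List.mem_cons_of_mem _ hj))

-- inner loop of A = a single conditional insert driven by the first (only) match
theorem inner_loop (k w : String) :
    ∀ (ys : List (String × String)) (m : PySem.Dict String String),
      (ys.map Prod.fst).Nodup →
      ys.foldl (fun m j => if k == j.1 then m.insert k (PySem.Str.join " " [w, j.2]) else m) m
        = match ys.find? (fun p => p.1 == k) with
          | some j => m.insert k (PySem.Str.join " " [w, j.2])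
          | none => m := by
  intro ys
  induction ys with
  | nil => intro m _; simp
  | cons y ys ih =>
    intro m hnd
    simp only [List.map_cons, List.nodup_cons] at hnd
    by_cases h : k = y.1
    · have hb : (k == y.1) = true := by simpa using h
      have hfind : (y.1 == k) = true := by simpa using h.symm
      simp only [List.foldl_cons, hb, if_true]
      simp only [List.find?_cons, hfind]
      exact inner_no_match k w ys _ (fun j hj he => by
        have hm := List.mem_map_of_mem (f := Prod.fst) hj
        rw [← he, h] at hm
        exact hnd.1 hm)
    · have hb : (k == y.1) = false := by simpa using h
      have hfind : (y.1 == k) = false := by simpa using (Ne.symm h)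
      simp only [List.foldl_cons, hb, Bool.false_eq_true, if_false]
      simp only [List.find?_cons, hfind]
      exact ih m hnd.2

-- a fold of erasures filters out all erased keys
theorem items_foldl_erase :
    ∀ (ks : List (String × String)) (d : PySem.Dict String String),
      (ks.foldl (fun d i => d.erase i.1) d).items
        = d.items.filter (fun p => ks.all (fun i => !(p.1 == i.1))) := by
  intro ks
  induction ks with
  | nil => intro d; simp
  | cons k ks ih =>
    intro d
    simp only [List.foldl_cons]
    rw [ih]
    simp only [PySem.Dict.erase, List.filter_filter]
    apply List.filter_congr
    intro p _
    simp [List.all_cons, Bool.and_comm]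

-- contains k = true iff some stored pair has key k
theorem contains_iff (d : PySem.Dict String String) (k : String) :
    d.contains k = true ↔ ∃ q ∈ d.items, q.1 = k := by
  simp [PySem.Dict.contains, List.any_eq_true]

-- the whole pipeline of A equals the whole pipeline of B on any two key-nodup dicts
theorem merge_core (da db : PySem.Dict String String)
    (ha : (da.items.map Prod.fst).Nodup) (hb : (db.items.map Prod.fst).Nodup) :
    (let merged_entries : PySem.Dict String String :=
       da.items.foldl (fun m i =>
         db.items.foldl (fun m j =>
           if i.1 == j.1 then m.insert i.1 (PySem.Str.join " " [i.2, j.2]) else m) m)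
         PySem.Dict.empty
     let a_left := merged_entries.items.foldl (fun d i => d.erase i.1) da
     let b_left := merged_entries.items.foldl (fun d i => d.erase i.1) db
     (((PySem.Dict.empty.update a_left.items).update b_left.items).update merged_entries.items).items)
    =
    (let out := da.items.foldl (fun m p => if db.contains p.1 then m else m.insert p.1 p.2) PySem.Dict.empty
     let out := db.items.foldl (fun m p => if da.contains p.1 then m else m.insert p.1 p.2) out
     let out := da.items.foldl (fun m p =>
       if db.contains p.1 then m.insert p.1 (PySem.Str.join " " [p.2, db.getD p.1 ""]) else m) out
     out.items) := by
  set g : String × String → String := fun p => PySem.Str.join " " [p.2, db.getD p.1 ""] with hg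
  set AL : List (String × String) := da.items.filter (fun p => !db.contains p.1) with hAL
  set BL : List (String × String) := db.items.filter (fun p => !da.contains p.1) with hBL
  set M : List (String × String) :=
    (da.items.filter (fun p => db.contains p.1)).map (fun p => (p.1, g p)) with hM
  -- keys facts
  have nAL : (AL.map Prod.fst).Nodup :=
    ((List.filter_sublist).map Prod.fst).nodup ha
  have nBL : (BL.map Prod.fst).Nodup :=
    ((List.filter_sublist).map Prod.fst).nodup hb
  have nM : (M.map Prod.fst).Nodup := by
    rw [hM, List.map_map]
    exact ((List.filter_sublist).map Prod.fst).nodup ha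
  -- key membership characterizations
  have memAL : ∀ p ∈ AL, p ∈ da.items ∧ db.contains p.1 = false := by
    intro p hp; rw [hAL] at hp
    have := List.mem_filter.mp hp
    exact ⟨this.1, by simpa using this.2⟩
  have memBL : ∀ p ∈ BL, p ∈ db.items ∧ da.contains p.1 = false := by
    intro p hp; rw [hBL] at hp
    have := List.mem_filter.mp hp
    exact ⟨this.1, by simpa using this.2⟩
  have memM : ∀ i ∈ M, ∃ q ∈ da.items, db.contains q.1 = true ∧ i = (q.1, g q) := by
    intro i hi; rw [hM] at hi
    obtain ⟨q, hq, rfl⟩ := List.mem_map.mp hi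
    have := List.mem_filter.mp hq
    exact ⟨q, this.1, this.2, rfl⟩
  -- Step 1: A's nested loop is a single conditional-insert pass
  have hstep : (fun (m : PySem.Dict String String) (i : String × String) =>
      db.items.foldl (fun m j =>
        if i.1 == j.1 then m.insert i.1 (PySem.Str.join " " [i.2, j.2]) else m) m)
      = (fun m i => if db.contains i.1 then m.insert i.1 (g i) else m) := by
    funext m i
    rw [inner_loop i.1 i.2 db.items m hb]
    cases hf : db.items.find? (fun p => p.1 == i.1) with
    | none =>
      have hc : db.contains i.1 = false := by
        have := List.find?_eq_none.mp hf
        simp only [PySem.Dict.contains, List.any_eq_false]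
        intro p hp; exact this p hp
      simp [hc]
    | some j =>
      have hj : j ∈ db.items := List.mem_of_find?_eq_some hf
      have hjk : (j.1 == i.1) = true := List.find?_some (p := fun q : String × String => q.1 == i.1) hf
      have hc : db.contains i.1 = true :=
        (contains_iff db i.1).mpr ⟨j, hj, by simpa using hjk⟩
      have hgd : db.getD i.1 "" = j.2 := by
        simp [PySem.Dict.getD, PySem.Dict.get?, hf]
      simp [hc, hg, hgd]
  have hMitems : (da.items.foldl
      (fun m i => if db.contains i.1 then m.insert i.1 (g i) else m)
      PySem.Dict.empty).items = M := by
    rw [items_foldl_insert_if (fun p => db.contains p.1) g da.items PySem.Dict.empty ha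
      (fun p _ _ => PySem.Dict.contains_empty p.1)]
    simp [hM, PySem.Dict.empty]
  -- Step 2: the erase folds are filters
  have keyM : ∀ (p : String × String), p ∈ da.items ∨ p ∈ db.items →
      (M.all (fun i => !(p.1 == i.1)) = !(da.contains p.1 && db.contains p.1)) := by
    intro p hp
    by_cases hc : da.contains p.1 = true ∧ db.contains p.1 = true
    · simp only [hc.1, hc.2, Bool.and_self, Bool.not_true]
      refine List.all_eq_false.mpr ?_
      obtain ⟨q, hq, hqk⟩ := (contains_iff da p.1).mp hc.1
      refine ⟨(q.1, g q), ?_, by simp [hqk]⟩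
      rw [hM]
      exact List.mem_map_of_mem (List.mem_filter.mpr ⟨hq, by rw [hqk]; exact hc.2⟩)
    · have : (da.contains p.1 && db.contains p.1) = false := by
        cases h1 : da.contains p.1 <;> cases h2 : db.contains p.1 <;> simp_all
      rw [this, Bool.not_false]
      refine List.all_eq_true.mpr ?_
      intro i hi
      obtain ⟨q, hq, hqc, rfl⟩ := memM i hi
      simp only [Bool.not_eq_true', beq_eq_false_iff_ne, ne_eq]
      intro he
      have hdac : da.contains p.1 = true := (contains_iff da p.1).mpr ⟨q, hq, he.symm⟩
      have hdbc : db.contains p.1 = true := by rw [he]; exact hqc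
      exact hc ⟨hdac, hdbc⟩
  have hALitems : (M.foldl (fun d i => d.erase i.1) da).items = AL := by
    rw [items_foldl_erase, hAL]
    apply List.filter_congr
    intro p hp
    rw [keyM p (Or.inl hp)]
    have : da.contains p.1 = true := (contains_iff da p.1).mpr ⟨p, hp, rfl⟩
    simp [this]
  have hBLitems : (M.foldl (fun d i => d.erase i.1) db).items = BL := by
    rw [items_foldl_erase, hBL]
    apply List.filter_congr
    intro p hp
    rw [keyM p (Or.inr hp)]
    have : db.contains p.1 = true := (contains_iff db p.1).mpr ⟨p, hp, rfl⟩
    simp [this]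
  -- Step 3: the final update chain appends the three disjoint blocks
  have h0 : (PySem.Dict.empty.update AL).items = AL := by
    show (AL.foldl (fun (acc : PySem.Dict String String) p => acc.insert p.1 p.2) PySem.Dict.empty).items = AL
    rw [PySem.Dict.items_foldl_insert_fresh AL Prod.fst Prod.snd PySem.Dict.empty
      (fun p _ => PySem.Dict.contains_empty p.1) nAL]
    simp [PySem.Dict.empty]
  have freshBL : ∀ p ∈ BL, (PySem.Dict.empty.update AL).contains p.1 = false := by
    intro p hp
    simp only [PySem.Dict.contains, h0, List.any_eq_false]
    intro q hq
    obtain ⟨hqda, hqnb⟩ := memAL q hq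
    simp only [Bool.not_eq_true, beq_eq_false_iff_ne, ne_eq]
    intro he
    have : db.contains q.1 = true := by
      rw [he]; exact (contains_iff db p.1).mpr ⟨p, (memBL p hp).1, rfl⟩
    rw [this] at hqnb; cases hqnb
  have h1 : ((PySem.Dict.empty.update AL).update BL).items = AL ++ BL := by
    show (BL.foldl (fun (acc : PySem.Dict String String) p => acc.insert p.1 p.2) (PySem.Dict.empty.update AL)).items = AL ++ BL
    rw [PySem.Dict.items_foldl_insert_fresh BL Prod.fst Prod.snd _ freshBL nBL, h0]
    simp
  have freshM : ∀ i ∈ M, ((PySem.Dict.empty.update AL).update BL).contains i.1 = false := by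
    intro i hi
    obtain ⟨q, hq, hqc, rfl⟩ := memM i hi
    show ((PySem.Dict.empty.update AL).update BL).items.any (fun r => r.1 == q.1) = false
    rw [h1, List.any_append]
    have hA : AL.any (fun r => r.1 == q.1) = false := by
      simp only [List.any_eq_false]
      intro r hr
      simp only [Bool.not_eq_true, beq_eq_false_iff_ne, ne_eq]
      intro he
      have hrnb := (memAL r hr).2
      rw [he, hqc] at hrnb; cases hrnb
    have hB : BL.any (fun r => r.1 == q.1) = false := by
      simp only [List.any_eq_false]
      intro r hr
      simp only [Bool.not_eq_true, beq_eq_false_iff_ne, ne_eq]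
      intro he
      have hrna := (memBL r hr).2
      have hda : da.contains r.1 = true := by
        rw [he]; exact (contains_iff da q.1).mpr ⟨q, hq, rfl⟩
      rw [hda] at hrna; cases hrna
    rw [hA, hB, Bool.or_self]
  have h2 : (((PySem.Dict.empty.update AL).update BL).update M).items = AL ++ BL ++ M := by
    show (M.foldl (fun (acc : PySem.Dict String String) p => acc.insert p.1 p.2) ((PySem.Dict.empty.update AL).update BL)).items = AL ++ BL ++ M
    rw [PySem.Dict.items_foldl_insert_fresh M Prod.fst Prod.snd _ freshM nM, h1]
    simp [List.append_assoc]
  -- B side phases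
  have hb1step : (fun (m : PySem.Dict String String) (p : String × String) =>
      if db.contains p.1 then m else m.insert p.1 p.2)
      = (fun m p => if !db.contains p.1 then m.insert p.1 p.2 else m) := by
    funext m p; cases db.contains p.1 <;> simp
  have hb2step : (fun (m : PySem.Dict String String) (p : String × String) =>
      if da.contains p.1 then m else m.insert p.1 p.2)
      = (fun m p => if !da.contains p.1 then m.insert p.1 p.2 else m) := by
    funext m p; cases da.contains p.1 <;> simp
  have hout0 : (da.items.foldl
      (fun m p => if !db.contains p.1 then m.insert p.1 p.2 else m)
      PySem.Dict.empty).items = AL := by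
    rw [items_foldl_insert_if (fun p => !db.contains p.1) Prod.snd da.items PySem.Dict.empty ha
      (fun p _ _ => PySem.Dict.contains_empty p.1)]
    simp [hAL, PySem.Dict.empty]
  have hout1 : (db.items.foldl
      (fun m p => if !da.contains p.1 then m.insert p.1 p.2 else m)
      (da.items.foldl (fun m p => if !db.contains p.1 then m.insert p.1 p.2 else m)
        PySem.Dict.empty)).items = AL ++ BL := by
    rw [items_foldl_insert_if (fun p => !da.contains p.1) Prod.snd db.items _ hb
      (fun p hp hP => by
        show (da.items.foldl (fun m p => if !db.contains p.1 then m.insert p.1 p.2 else m)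
          PySem.Dict.empty).items.any (fun q => q.1 == p.1) = false
        rw [hout0]
        simp only [List.any_eq_false]
        intro q hq
        obtain ⟨_, hqnb⟩ := memAL q hq
        simp only [Bool.not_eq_true, beq_eq_false_iff_ne, ne_eq]
        intro he
        have : db.contains q.1 = true := by
          rw [he]; exact (contains_iff db p.1).mpr ⟨p, hp, rfl⟩
        rw [this] at hqnb; cases hqnb), hout0]
    simp [hBL]
  have hout2 : (da.items.foldl
      (fun m p => if db.contains p.1 then m.insert p.1 (PySem.Str.join " " [p.2, db.getD p.1 ""]) else m)
      (db.items.foldl (fun m p => if !da.contains p.1 then m.insert p.1 p.2 else m)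
        (da.items.foldl (fun m p => if !db.contains p.1 then m.insert p.1 p.2 else m)
          PySem.Dict.empty))).items = AL ++ BL ++ M := by
    rw [items_foldl_insert_if (fun p => db.contains p.1) g da.items _ ha
      (fun p hp hP => by
        show (db.items.foldl (fun m p => if !da.contains p.1 then m.insert p.1 p.2 else m)
          (da.items.foldl (fun m p => if !db.contains p.1 then m.insert p.1 p.2 else m)
            PySem.Dict.empty)).items.any (fun q => q.1 == p.1) = false
        rw [hout1, List.any_append]
        have hA : AL.any (fun q => q.1 == p.1) = false := by
          simp only [List.any_eq_false]
          intro r hr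
          simp only [Bool.not_eq_true, beq_eq_false_iff_ne, ne_eq]
          intro he
          have hrnb := (memAL r hr).2
          have hP' : db.contains p.1 = true := hP
          rw [he, hP'] at hrnb; cases hrnb
        have hB : BL.any (fun q => q.1 == p.1) = false := by
          simp only [List.any_eq_false]
          intro r hr
          simp only [Bool.not_eq_true, beq_eq_false_iff_ne, ne_eq]
          intro he
          have hrna := (memBL r hr).2
          have hda : da.contains r.1 = true := by
            rw [he]; exact (contains_iff da p.1).mpr ⟨p, hp, rfl⟩
          rw [hda] at hrna; cases hrna
        simp [hA, hB]), hout1]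
  -- assemble
  show (((PySem.Dict.empty.update
      ((da.items.foldl (fun m i =>
         db.items.foldl (fun m j =>
           if i.1 == j.1 then m.insert i.1 (PySem.Str.join " " [i.2, j.2]) else m) m)
         PySem.Dict.empty).items.foldl (fun d i => d.erase i.1) da).items).update
      ((da.items.foldl (fun m i =>
         db.items.foldl (fun m j =>
           if i.1 == j.1 then m.insert i.1 (PySem.Str.join " " [i.2, j.2]) else m) m)
         PySem.Dict.empty).items.foldl (fun d i => d.erase i.1) db).items).update
      (da.items.foldl (fun m i =>
         db.items.foldl (fun m j =>
           if i.1 == j.1 then m.insert i.1 (PySem.Str.join " " [i.2, j.2]) else m) m)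
         PySem.Dict.empty).items).items
    = (da.items.foldl
      (fun m p => if db.contains p.1 then m.insert p.1 (PySem.Str.join " " [p.2, db.getD p.1 ""]) else m)
      (db.items.foldl (fun m p => if da.contains p.1 then m else m.insert p.1 p.2)
        (da.items.foldl (fun m p => if db.contains p.1 then m else m.insert p.1 p.2)
          PySem.Dict.empty))).items
  rw [hstep, hb1step, hb2step, hMitems, hALitems, hBLitems, hout2, h2]

-- ===== VERDICT (by name: the statement is the Claim_ definition above) =====
theorem merge_flag_dictionaries_spec : Claim_equal_merge_flag_dictionaries := by
  intro a b _
  show merge_flag_dictionaries a b = merge_flag_dictionaries_alt a b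
  have ha : ((PySem.Dict.ofList a).items.map Prod.fst).Nodup := by
    have := PySem.Dict.nodup_keys_ofList (ν := String) a
    simpa [PySem.Dict.keys] using this
  have hb : ((PySem.Dict.ofList b).items.map Prod.fst).Nodup := by
    have := PySem.Dict.nodup_keys_ofList (ν := String) b
    simpa [PySem.Dict.keys] using this
  exact merge_core (PySem.Dict.ofList a) (PySem.Dict.ofList b) ha hb
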